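-- pv_equiv track=rewrite | github.com/gradgrind/WZ3 | wz/core/classes.py | atomic_maps
-- ===== SOURCE A (Python) =====
-- def atomic_maps(atoms, groups):
--     """Build mapping {group -> atom-list} for the "usable" groups
--     (those defined for the class in the database).
--     """
--     if len(atoms) > 1:
--         atomsetlist = [(a, set(a.split('.'))) for a in atoms]
--         gmap = {'': atoms}
--         for g in groups:
--             gset = set()
--             g_s = set(g.split('.'))
--             for a, a_s in atomsetlist:
--                 if g_s <= a_s:
--                     gset.add(a)
--             gmap[g] = sorted(gset)
--         return gmap
--     else:
--         return {'': []}
-- ===== SOURCE B (Python) =====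
-- def atomic_maps(atoms, groups):
--     """Build mapping {group -> atom-list} for the "usable" groups
--     (those defined for the class in the database).
--     """
--     if len(atoms) <= 1:
--         return {'': []}
--     # inverted index: tag -> set of atoms whose tag-set contains it
--     index = {}
--     for a in atoms:
--         for t in a.split('.'):
--             index.setdefault(t, set()).add(a)
--     gmap = {'': atoms}
--     for g in groups:
--         tags = g.split('.')
--         gset = index.get(tags[0], set())
--         for t in tags[1:]:
--             gset = gset & index.get(t, set())
--         gmap[g] = sorted(gset)
--     return gmap
-- ===== Notes on version B (the rewrite author's own statement) =====
-- stated objective: faster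
-- what changed: Replaces A's per-group linear scan that tag-subset-tests every atom's tag-set with an inverted index (tag -> atom-set) built once over the atoms, each group's atom set then computed as the intersection of the index entries of its tags.
import Mathlib
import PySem

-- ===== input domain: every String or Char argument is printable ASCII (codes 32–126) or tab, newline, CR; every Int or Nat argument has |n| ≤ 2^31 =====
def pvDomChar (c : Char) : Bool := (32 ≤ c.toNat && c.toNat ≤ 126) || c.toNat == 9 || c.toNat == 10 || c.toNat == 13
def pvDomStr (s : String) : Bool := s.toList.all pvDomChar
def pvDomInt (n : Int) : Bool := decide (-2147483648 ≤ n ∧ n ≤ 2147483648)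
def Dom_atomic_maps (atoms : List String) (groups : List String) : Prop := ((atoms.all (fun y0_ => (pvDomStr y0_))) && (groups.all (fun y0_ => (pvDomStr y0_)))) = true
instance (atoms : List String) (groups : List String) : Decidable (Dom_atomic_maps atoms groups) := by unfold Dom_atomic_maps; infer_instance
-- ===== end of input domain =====

-- B replaces A's per-group scan testing the tag-subset condition against every atom
-- by an inverted index tag -> atom-set built once, each group's set computed by
-- intersecting the index entries of its tags (objective: faster; measured).

-- shared primitive: Python's s.split('.') (separator is the non-empty literal ".")
def splitDot (s : String) : List String := (PySem.Str.split? s ".").getD []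

-- ===== PORT A =====
def atomic_maps (atoms : List String) (groups : List String) : List (String × List String) :=
  if atoms.length > 1 then
    let atomsetlist : List (String × PySem.Set String) :=
      atoms.map (fun a => (a, PySem.Set.ofList (splitDot a)))
    let gmap0 : PySem.Dict String (List String) := PySem.Dict.empty.insert "" atoms
    (groups.foldl (fun gmap g =>
      let g_s : PySem.Set String := PySem.Set.ofList (splitDot g)
      let gset : PySem.Set String := atomsetlist.foldl
        (fun gset p => if PySem.Set.issubset g_s p.2 then PySem.Set.add gset p.1 else gset)
        PySem.Set.empty
      gmap.insert g (PySem.List.sorted gset (fun x => x) false)) gmap0).items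
  else (PySem.Dict.empty.insert "" ([] : List String)).items

-- ===== PORT B =====
def atomic_maps_alt (atoms : List String) (groups : List String) : List (String × List String) :=
  if atoms.length ≤ 1 then (PySem.Dict.empty.insert "" ([] : List String)).items
  else
    let index : PySem.Dict String (PySem.Set String) :=
      atoms.foldl (fun d a =>
        (splitDot a).foldl
          (fun d t => d.modify t PySem.Set.empty (fun s => PySem.Set.add s a)) d)
        PySem.Dict.empty
    let gmap0 : PySem.Dict String (List String) := PySem.Dict.empty.insert "" atoms
    (groups.foldl (fun gmap g =>
      let gset : PySem.Set String := (splitDot g).foldl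
        (fun gset t => PySem.Set.inter gset (index.getD t PySem.Set.empty))
        (PySem.Set.ofList atoms)
      gmap.insert g (PySem.List.sorted gset (fun x => x) false)) gmap0).items

-- ===== PRECONDITION & SPEC =====
def Spec_atomic_maps (atoms : List String) (groups : List String) (out : List (String × List String)) : Prop := out = atomic_maps_alt atoms groups
instance (atoms : List String) (groups : List String) (out : List (String × List String)) : Decidable (Spec_atomic_maps atoms groups out) := by unfold Spec_atomic_maps; infer_instance

-- ===== CLAIM (what is proved, stated in full; the proofs are below) =====
def Claim_equal_atomic_maps : Prop := ∀ (atoms : List String) (groups : List String), Dom_atomic_maps atoms groups → Spec_atomic_maps atoms groups (atomic_maps atoms groups)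

-- ===== LEMMAS AND PROOFS =====

-- A's inner loop: membership in the conditional add-fold
theorem memA (l : List (String × PySem.Set String)) (g_s : PySem.Set String)
    (s : PySem.Set String) (x : String) :
    x ∈ l.foldl (fun s p => if PySem.Set.issubset g_s p.2 then PySem.Set.add s p.1 else s) s ↔
      x ∈ s ∨ ∃ p ∈ l, PySem.Set.issubset g_s p.2 ∧ x = p.1 := by
  induction l generalizing s with
  | nil => simp
  | cons p l ih =>
    simp only [List.foldl_cons, List.mem_cons]
    by_cases hp : PySem.Set.issubset g_s p.2
    · rw [if_pos hp, ih, PySem.Set.mem_add]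
      constructor
      · rintro ((h|rfl)|⟨q,hq,h1,h2⟩)
        · exact Or.inl h
        · exact Or.inr ⟨p, Or.inl rfl, hp, rfl⟩
        · exact Or.inr ⟨q, Or.inr hq, h1, h2⟩
      · rintro (h|⟨q,(rfl|hq),h1,h2⟩)
        · exact Or.inl (Or.inl h)
        · exact Or.inl (Or.inr h2)
        · exact Or.inr ⟨q, hq, h1, h2⟩
    · rw [if_neg hp, ih]
      constructor
      · rintro (h|⟨q,hq,h1,h2⟩)
        · exact Or.inl h
        · exact Or.inr ⟨q, Or.inr hq, h1, h2⟩
      · rintro (h|⟨q,(rfl|hq),h1,h2⟩)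
        · exact Or.inl h
        · exact absurd h1 hp
        · exact Or.inr ⟨q, hq, h1, h2⟩

theorem nodA (l : List (String × PySem.Set String)) (g_s : PySem.Set String)
    (s : PySem.Set String) (hs : s.Nodup) :
    (l.foldl (fun s p => if PySem.Set.issubset g_s p.2 then PySem.Set.add s p.1 else s) s).Nodup := by
  induction l generalizing s with
  | nil => simpa
  | cons p l ih =>
    simp only [List.foldl_cons]
    split_ifs with hp
    · exact ih _ (PySem.Set.nodup_add _ _ hs)
    · exact ih _ hs

-- B's inner tag loop over one atom's tags
theorem memInner (ts : List String) (a : String) (d : PySem.Dict String (PySem.Set String))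
    (t x : String) :
    x ∈ ((ts.foldl (fun d t => d.modify t PySem.Set.empty (fun s => PySem.Set.add s a)) d).getD t PySem.Set.empty) ↔
      x ∈ d.getD t PySem.Set.empty ∨ (x = a ∧ t ∈ ts) := by
  induction ts generalizing d with
  | nil => simp
  | cons u ts ih =>
    simp only [List.foldl_cons, ih, PySem.Dict.getD_modify, List.mem_cons]
    by_cases h : t = u
    · rw [if_pos h, PySem.Set.mem_add, h]
      tauto
    · rw [if_neg h]
      tauto

-- B's index: membership characterisation
theorem memIdx (atoms : List String) (d : PySem.Dict String (PySem.Set String)) (t x : String) :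
    x ∈ ((atoms.foldl (fun d a =>
        (splitDot a).foldl (fun d t => d.modify t PySem.Set.empty (fun s => PySem.Set.add s a)) d) d).getD t PySem.Set.empty) ↔
      x ∈ d.getD t PySem.Set.empty ∨ (x ∈ atoms ∧ t ∈ splitDot x) := by
  induction atoms generalizing d with
  | nil => simp
  | cons a atoms ih =>
    simp only [List.foldl_cons, ih, memInner, List.mem_cons]
    constructor
    · rintro ((h|⟨rfl,h⟩)|⟨h1,h2⟩)
      · exact Or.inl h
      · exact Or.inr ⟨Or.inl rfl, h⟩
      · exact Or.inr ⟨Or.inr h1, h2⟩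
    · rintro (h|⟨(rfl|h1),h2⟩)
      · exact Or.inl (Or.inl h)
      · exact Or.inl (Or.inr ⟨rfl, h2⟩)
      · exact Or.inr ⟨h1, h2⟩

-- B's group loop: membership in the intersection fold
theorem memB (ts : List String) (index : PySem.Dict String (PySem.Set String))
    (s : PySem.Set String) (x : String) :
    x ∈ ts.foldl (fun s t => PySem.Set.inter s (index.getD t PySem.Set.empty)) s ↔
      x ∈ s ∧ ∀ t ∈ ts, x ∈ index.getD t PySem.Set.empty := by
  induction ts generalizing s with
  | nil => simp
  | cons u ts ih =>
    simp only [List.foldl_cons, ih, PySem.Set.mem_inter, List.mem_cons]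
    constructor
    · rintro ⟨⟨h1,h2⟩,h3⟩
      exact ⟨h1, fun t ht => ht.elim (fun e => e ▸ h2) (h3 t)⟩
    · rintro ⟨h1,h2⟩
      exact ⟨⟨h1, h2 u (Or.inl rfl)⟩, fun t ht => h2 t (Or.inr ht)⟩

theorem nodB (ts : List String) (index : PySem.Dict String (PySem.Set String))
    (s : PySem.Set String) (hs : s.Nodup) :
    (ts.foldl (fun s t => PySem.Set.inter s (index.getD t PySem.Set.empty)) s).Nodup := by
  induction ts generalizing s with
  | nil => simpa
  | cons u ts ih =>
    exact ih _ (PySem.Set.nodup_inter _ _ hs)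

-- the two per-group atom lists coincide
theorem gset_eq (atoms : List String) (g : String) :
    PySem.List.sorted
      ((atoms.map (fun a => (a, PySem.Set.ofList (splitDot a)))).foldl
        (fun gset p => if PySem.Set.issubset (PySem.Set.ofList (splitDot g)) p.2 then PySem.Set.add gset p.1 else gset)
        PySem.Set.empty) (fun x => x) false =
    PySem.List.sorted
      ((splitDot g).foldl
        (fun gset t => PySem.Set.inter gset
          ((atoms.foldl (fun d a =>
            (splitDot a).foldl (fun d t => d.modify t PySem.Set.empty (fun s => PySem.Set.add s a)) d)
            PySem.Dict.empty).getD t PySem.Set.empty))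
        (PySem.Set.ofList atoms)) (fun x => x) false := by
  apply PySem.List.sorted_eq_sorted_of_perm _ _ _ (fun a b h => h)
  apply (List.perm_ext_iff_of_nodup (nodA _ _ _ List.nodup_nil) (nodB _ _ _ (PySem.Set.nodup_ofList _))).mpr
  intro x
  rw [memA, memB]
  simp only [List.mem_map, List.not_mem_nil, false_or, PySem.Set.mem_ofList]
  constructor
  · rintro ⟨p, ⟨a, ha, rfl⟩, h1, rfl⟩
    refine ⟨ha, fun t ht => ?_⟩
    rw [memIdx]
    right
    exact ⟨ha, (PySem.Set.mem_ofList _ _).mp ((PySem.Set.issubset_iff _ _).mp h1 t ((PySem.Set.mem_ofList _ _).mpr ht))⟩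
  · rintro ⟨hx, h⟩
    refine ⟨(x, PySem.Set.ofList (splitDot x)), ⟨x, hx, rfl⟩, ?_, rfl⟩
    rw [PySem.Set.issubset_iff _ _]
    intro t ht
    rw [PySem.Set.mem_ofList] at ht ⊢
    have := (memIdx atoms PySem.Dict.empty t x).mp (h t ht)
    exact (by simpa [PySem.Dict.getD_empty] using this : x ∈ atoms ∧ t ∈ splitDot x).2

-- ===== VERDICT (by name: the statement is the Claim_ definition above) =====
theorem atomic_maps_spec : Claim_equal_atomic_maps := by
  intro atoms groups _
  unfold Spec_atomic_maps atomic_maps atomic_maps_alt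
  by_cases h : atoms.length > 1
  · rw [if_pos h, if_neg (by omega)]
    simp only [gset_eq atoms]
  · rw [if_neg h, if_pos (by omega)]
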